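-- pv_equiv track=rewrite | github.com/beaugogh/deep_research_poc | dr/demo.py | _filter_nested_blocks
-- ===== SOURCE A (Python) =====
-- def _filter_nested_blocks(blocks: list) -> list:
--     """
--     Filter out nested blocks, keeping only outermost ones.
--     Blocks should be tuples of (start_pos, end_pos, ...).
--     """
--     if not blocks:
--         return []
--
--     filtered = []
--     sorted_blocks = sorted(
--         blocks, key=lambda x: (x[0], -x[1])
--     )  # Sort by start, then by end descending
--
--     for block in sorted_blocks:
--         start, end = block[0], block[1]
--         # Check if this block is nested within any already filtered block
--         is_nested = any(
--             start >= prev_start and end <= prev_end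
--             for prev_start, prev_end, *_ in filtered
--         )
--         if not is_nested:
--             filtered.append(block)
--
--     return filtered
-- ===== SOURCE B (Python) =====
-- def _filter_nested_blocks(blocks: list) -> list:
--     # Sort by (start, -end); one pass keeping a block iff its end exceeds the running max end.
--     result = []
--     max_end = None
--     for block in sorted(blocks, key=lambda x: (x[0], -x[1])):
--         end = block[1]
--         if max_end is None or end > max_end:
--             result.append(block)
--             max_end = end
--     return result
-- ===== Notes on version B (the rewrite author's own statement) =====
-- stated objective: faster
-- what changed: B replaces A's inner any-scan over all kept blocks with a single running maximum of kept end positions after the same sort, keeping a block iff its end exceeds that maximum.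
import Mathlib
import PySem

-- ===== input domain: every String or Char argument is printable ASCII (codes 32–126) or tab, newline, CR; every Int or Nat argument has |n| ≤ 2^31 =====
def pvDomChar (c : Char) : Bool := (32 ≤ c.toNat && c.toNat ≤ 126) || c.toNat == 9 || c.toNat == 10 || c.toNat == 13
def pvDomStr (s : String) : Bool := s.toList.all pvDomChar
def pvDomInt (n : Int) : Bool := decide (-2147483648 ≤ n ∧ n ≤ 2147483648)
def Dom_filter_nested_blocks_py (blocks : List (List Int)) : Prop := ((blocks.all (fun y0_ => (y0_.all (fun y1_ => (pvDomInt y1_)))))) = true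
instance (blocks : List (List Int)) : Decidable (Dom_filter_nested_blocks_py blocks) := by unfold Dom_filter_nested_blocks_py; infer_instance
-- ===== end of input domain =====

-- B replaces A's quadratic inner containment scan with a single pass over the sorted
-- blocks that tracks the running maximum end (objective: faster, asymptotic).


-- the Python sort key lambda x: (x[0], -x[1]) — lexicographic tuple comparison
def pvKey (x : List Int) : Lex (Int × Int) :=
  toLex (PySem.List.pyGetD x 0 0, -(PySem.List.pyGetD x 1 0))

-- ===== PORT A =====
-- loop body of A: keep block unless it is nested in an already-kept block
def pvAStep (filtered : List (List Int)) (block : List Int) : List (List Int) :=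
  let start := PySem.List.pyGetD block 0 0
  let stop := PySem.List.pyGetD block 1 0
  let isNested := filtered.any (fun prev =>
    decide (PySem.List.pyGetD prev 0 0 ≤ start ∧ stop ≤ PySem.List.pyGetD prev 1 0))
  if isNested then filtered else filtered ++ [block]

def filter_nested_blocks_py (blocks : List (List Int)) : List (List Int) :=
  if blocks = [] then []
  else (PySem.List.sorted blocks pvKey).foldl pvAStep []

-- ===== PORT B =====
-- loop body of B: keep block iff its end exceeds the running max end (None at the start)
def pvBStep (s : List (List Int) × Option Int) (block : List Int) : List (List Int) × Option Int :=
  let e := PySem.List.pyGetD block 1 0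
  match s.2 with
  | none => (s.1 ++ [block], some e)
  | some m => if m < e then (s.1 ++ [block], some e) else s

def filter_nested_blocks_py_alt (blocks : List (List Int)) : List (List Int) :=
  ((PySem.List.sorted blocks pvKey).foldl pvBStep ([], none)).1

-- ===== PRECONDITION & SPEC =====
-- Pre_ excludes blocks with fewer than 2 entries: there Python A raises IndexError in the sort key (and B too).
def Pre_filter_nested_blocks_py (blocks : List (List Int)) : Prop :=
  ∀ b ∈ blocks, 2 ≤ b.length
instance (blocks : List (List Int)) : Decidable (Pre_filter_nested_blocks_py blocks) := by unfold Pre_filter_nested_blocks_py; infer_instance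
def pvWitness_filter_nested_blocks_py : List (List Int) := [[0, 5], [1, 3], [2, 8]]

def Spec_filter_nested_blocks_py (blocks : List (List Int)) (out : List (List Int)) : Prop := out = filter_nested_blocks_py_alt blocks
instance (blocks : List (List Int)) (out : List (List Int)) : Decidable (Spec_filter_nested_blocks_py blocks out) := by unfold Spec_filter_nested_blocks_py; infer_instance

-- ===== CLAIM (what is proved, stated in full; the proofs are below) =====
def Claim_equal_filter_nested_blocks_py : Prop := ∀ (blocks : List (List Int)), Dom_filter_nested_blocks_py blocks → Pre_filter_nested_blocks_py blocks → Spec_filter_nested_blocks_py blocks (filter_nested_blocks_py blocks)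

-- ===== LEMMAS AND PROOFS =====

-- the key is monotone in the start component
lemma pvKey_le_start {a b : List Int} (h : pvKey a ≤ pvKey b) :
    PySem.List.pyGetD a 0 0 ≤ PySem.List.pyGetD b 0 0 := by
  unfold pvKey at h
  rcases (Prod.Lex.toLex_le_toLex).1 h with h1 | ⟨h1, _⟩
  · exact le_of_lt h1
  · exact le_of_eq h1

-- main invariant: A's fold and B's fold agree, given that every already-kept block
-- starts no later than every remaining block and the Option tracks the max kept end
lemma pv_loop_eq : ∀ (S acc : List (List Int)) (m : Option Int),
    S.Pairwise (fun a b => pvKey a ≤ pvKey b) →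
    (∀ p ∈ acc, ∀ b ∈ S, PySem.List.pyGetD p 0 0 ≤ PySem.List.pyGetD b 0 0) →
    (m = none → acc = []) →
    (∀ mv, m = some mv →
      (∃ p ∈ acc, PySem.List.pyGetD p 1 0 = mv) ∧
      ∀ p ∈ acc, PySem.List.pyGetD p 1 0 ≤ mv) →
    S.foldl pvAStep acc = (S.foldl pvBStep (acc, m)).1 := by
  intro S
  induction S with
  | nil => intro acc m _ _ _ _; rfl
  | cons b S ih =>
    intro acc m hpw hstart hnone hsome
    rcases List.pairwise_cons.1 hpw with ⟨hb, hpwS⟩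
    simp only [List.foldl_cons]
    match m with
    | none =>
      have hacc : acc = [] := hnone rfl
      subst hacc
      have hA : pvAStep [] b = [b] := by simp [pvAStep]
      have hB : pvBStep ([], none) b = ([b], some (PySem.List.pyGetD b 1 0)) := by
        simp [pvBStep]
      rw [hA, hB]
      apply ih
      · exact hpwS
      · intro p hp x hx
        simp only [List.mem_singleton] at hp; subst hp
        exact pvKey_le_start (hb x hx)
      · intro h; cases h
      · intro mv hmv
        cases hmv
        exact ⟨⟨b, List.mem_singleton.2 rfl, rfl⟩, by
          intro p hp; simp only [List.mem_singleton] at hp; subst hp; exact le_refl _⟩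
    | some mv =>
      rcases hsome mv rfl with ⟨⟨q, hq, hqmv⟩, hub⟩
      by_cases hlt : mv < PySem.List.pyGetD b 1 0
      · -- kept: end exceeds running max, and no kept block can contain b
        have hA : pvAStep acc b = acc ++ [b] := by
          have hcond : acc.any (fun prev =>
              decide (PySem.List.pyGetD prev 0 0 ≤ PySem.List.pyGetD b 0 0 ∧
                PySem.List.pyGetD b 1 0 ≤ PySem.List.pyGetD prev 1 0)) = false := by
            rw [List.any_eq_false]
            intro p hp
            simp only [decide_eq_true_eq] at *
            intro ⟨_, h2⟩
            exact absurd (le_trans h2 (hub p hp)) (not_le.2 hlt)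
          simp only [pvAStep]
          rw [hcond]
          simp
        have hB : pvBStep (acc, some mv) b = (acc ++ [b], some (PySem.List.pyGetD b 1 0)) := by
          simp [pvBStep, hlt]
        rw [hA, hB]
        apply ih
        · exact hpwS
        · intro p hp x hx
          rcases List.mem_append.1 hp with hp | hp
          · exact hstart p hp x (List.mem_cons_of_mem _ hx)
          · simp only [List.mem_singleton] at hp; subst hp
            exact pvKey_le_start (hb x hx)
        · intro h; cases h
        · intro mv' hmv'
          cases hmv'
          refine ⟨⟨b, List.mem_append_right _ (List.mem_singleton.2 rfl), rfl⟩, ?_⟩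
          intro p hp
          rcases List.mem_append.1 hp with hp | hp
          · exact le_of_lt (lt_of_le_of_lt (hub p hp) hlt)
          · simp only [List.mem_singleton] at hp; subst hp; exact le_refl _
      · -- dropped: b is nested in the kept block attaining the max end
        have hA : pvAStep acc b = acc := by
          have hcond : acc.any (fun prev =>
              decide (PySem.List.pyGetD prev 0 0 ≤ PySem.List.pyGetD b 0 0 ∧
                PySem.List.pyGetD b 1 0 ≤ PySem.List.pyGetD prev 1 0)) = true := by
            rw [List.any_eq_true]
            refine ⟨q, hq, ?_⟩
            simp only [decide_eq_true_eq]
            exact ⟨hstart q hq b (List.mem_cons_self), by rw [hqmv]; exact not_lt.1 hlt⟩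
          simp only [pvAStep]
          rw [hcond]
          simp
        have hB : pvBStep (acc, some mv) b = (acc, some mv) := by
          simp [pvBStep, hlt]
        rw [hA, hB]
        apply ih
        · exact hpwS
        · intro p hp x hx
          exact hstart p hp x (List.mem_cons_of_mem _ hx)
        · intro h; cases h
        · intro mv' hmv'
          cases hmv'
          exact ⟨⟨q, hq, hqmv⟩, hub⟩

-- ===== VERDICT (by name: the statement is the Claim_ definition above) =====
theorem filter_nested_blocks_py_spec : Claim_equal_filter_nested_blocks_py := by
  intro blocks _ _
  unfold Spec_filter_nested_blocks_py filter_nested_blocks_py filter_nested_blocks_py_alt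
  by_cases h : blocks = []
  · subst h; rfl
  · simp only [h, if_false]
    apply pv_loop_eq
    · exact PySem.List.sorted_pairwise blocks pvKey
    · intro p hp; cases hp
    · intro _; rfl
    · intro mv hmv; cases hmv
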